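-- pv_equiv track=rewrite | github.com/pypi-data/pypi-mirror-322 | packages/polynomial-fit/polynomial_fit-0.0.2.tar.gz/polynomial_fit-0.0.2/polynomial_fit/__init__.py | generate_terms
-- ===== SOURCE A (Python) =====
-- def increment(term, max_value):
--     """
--     Increment a term in the polynomial term list.
--
--     Parameters:
--         term (list): current term to be incremented.
--         max_value (int): the maximum value that any element in the term can possess.
--
--     Returns:
--         list or None: The incremented term or None if incrementing is no longer possible.
--     """
--
--     # loop through term backwards
--     for i in range(len(term)-1, -1, -1):
--         if term[i] < max_value:
--             term[i] += 1  # increment if we have not reached last variable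
--             for j in range(i+1, len(term)):
--                 term[j] = term[i]  # increment each term value after the current to avoid repeating terms ([0, 1, 0] becomes [0, 1, 1], since [0, 1, 0] = [0, 0, 1])
--             return term
--     # end external while loop if we have incremented as much as possible
--     return None
--
-- def generate_terms(num_var, order):
--     """
--     Generate all possible terms for a polynomial with given number of variables and order.
--
--     Parameters:
--         num_var (int): the number of input variables in the polynomial.
--         order (int): the order of the polynomial.
--
--     Returns:
--         list: a list of terms, where each term is represented by a list of exponents.
--
--         e.g. term list for 2nd order two-variable polynomial = [[], [0], [1], [0, 0], [0, 1], [1, 1]]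
--     """
--     terms = []
--     for r in range(order + 1):
--         term = [0] * r  # generate base term format
--         while term is not None:
--             terms.append(term.copy())  # add the initial term/incremented term
--             term = increment(term, max_value=num_var-1)
--     return terms
-- ===== SOURCE B (Python) =====
-- def generate_terms(num_var, order):
--     """Enumerate polynomial terms by recursive descent over non-decreasing tuples."""
--     terms = []
--
--     def extend(prefix, start, remaining):
--         if remaining == 0:
--             terms.append(list(prefix))
--             return
--         for v in range(start, num_var):
--             prefix.append(v)
--             extend(prefix, v, remaining - 1)
--             prefix.pop()
--
--     for r in range(order + 1):
--         extend([], 0, r)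
--     return terms
-- ===== Notes on version B (the rewrite author's own statement) =====
-- stated objective: alternative
-- what changed: Replaces A's successor-style enumeration (start at [0]*r and repeatedly compute the lexicographic successor by scanning the term from the right) with a recursive-descent generator that builds each non-decreasing r-tuple directly by extending a prefix with values v in [start, num_var).
-- intended difference: On num_var <= 0 with order >= 1, A still returns the phantom base terms [[], [0], [0,0], ...] that reference a variable index 0 which does not exist; B returns only [[]] (the constant term), which is the intended term list for a polynomial with no variables. — e.g. on generate_terms(0, 1): A returns [[], [0]], B returns [[]]
import Mathlib
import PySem

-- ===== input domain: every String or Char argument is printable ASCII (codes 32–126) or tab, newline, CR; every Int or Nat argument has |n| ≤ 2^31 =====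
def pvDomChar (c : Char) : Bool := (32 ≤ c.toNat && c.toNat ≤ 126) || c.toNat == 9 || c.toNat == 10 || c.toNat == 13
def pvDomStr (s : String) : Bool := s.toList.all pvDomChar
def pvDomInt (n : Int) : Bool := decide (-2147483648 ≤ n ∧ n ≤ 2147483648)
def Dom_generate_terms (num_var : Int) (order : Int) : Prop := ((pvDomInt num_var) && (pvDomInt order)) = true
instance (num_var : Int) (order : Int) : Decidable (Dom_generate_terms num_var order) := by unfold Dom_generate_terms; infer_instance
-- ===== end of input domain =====

-- B replaces A's successor/increment loop by a recursive-descent generator of non-decreasing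
-- tuples; on num_var ≤ 0 with order ≥ 1 B intentionally omits A's phantom [0]*r base terms (D_ below).
-- (Python's `increment` mutates its list argument in place; only the return value is modelled here.)

-- ===== PORT A =====
-- Python `increment`: scan the term from the right for the first slot < max_value,
-- bump it and set every later slot to the bumped value; None when impossible.
def pvIncrement (term : List Int) (max_value : Int) : Option (List Int) :=
  match term with
  | [] => none
  | x :: rest =>
    match pvIncrement rest max_value with
    | some r => some (x :: r)
    | none =>
      if x < max_value then some ((x + 1) :: List.replicate rest.length (x + 1))
      else none

-- the `while term is not None` loop; the Nat fuel only makes the same computation total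
-- (the proofs show the fuel supplied below is never exhausted)
def pvRunA (mx : Int) : Nat → List Int → List (List Int)
  | 0, _ => []
  | f + 1, t =>
    t :: (match pvIncrement t mx with
          | none => []
          | some t' => pvRunA mx f t')

def pvFuel (num_var : Int) (r : Nat) : Nat := (num_var.toNat + 1) ^ r + 1

def generate_terms (num_var : Int) (order : Int) : List (List Int) :=
  (PySem.List.pyRange 0 (order + 1) 1).foldl
    (fun terms r => terms ++ pvRunA (num_var - 1) (pvFuel num_var r.toNat) (List.replicate r.toNat 0))
    []

-- ===== PORT B =====
-- Source B's `extend(prefix, start, remaining)`: prefix+append+recurse+pop becomes mapping cons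
def pvExtend (num_var : Int) (remaining : Nat) (start : Int) : List (List Int) :=
  match remaining with
  | 0 => [[]]
  | k + 1 => (PySem.List.pyRange start num_var 1).flatMap
      (fun v => (pvExtend num_var k v).map (fun t => v :: t))

def generate_terms_alt (num_var : Int) (order : Int) : List (List Int) :=
  (PySem.List.pyRange 0 (order + 1) 1).foldl
    (fun terms r => terms ++ pvExtend num_var r.toNat 0) []

-- ===== PRECONDITION & SPEC =====
-- On num_var ≤ 0 with order ≥ 1, A returns the phantom base terms [[], [0], [0,0], …] that
-- reference a variable index 0 which does not exist; B returns only [[]] (the constant term),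
-- the intended term list for a polynomial with no variables.
def D_generate_terms (num_var : Int) (order : Int) : Prop := num_var ≤ 0 ∧ 1 ≤ order
instance (num_var : Int) (order : Int) : Decidable (D_generate_terms num_var order) := by
  unfold D_generate_terms; infer_instance

def Spec_generate_terms (num_var : Int) (order : Int) (out : List (List Int)) : Prop :=
  ¬ D_generate_terms num_var order → out = generate_terms_alt num_var order
instance (num_var : Int) (order : Int) (out : List (List Int)) : Decidable (Spec_generate_terms num_var order out) := by
  unfold Spec_generate_terms; infer_instance

def pvDiffWitness_generate_terms : Int × Int := (0, 1)
def pvDiffWitnessOut_generate_terms : (List (List Int)) × (List (List Int)) :=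
  ([[], [0]], [[]])

-- ===== CLAIM (what is proved, stated in full; the proofs are below) =====
def Claim_unchanged_generate_terms : Prop := ∀ (num_var : Int) (order : Int), Dom_generate_terms num_var order → Spec_generate_terms num_var order (generate_terms num_var order)
def Claim_changed_generate_terms : Prop := Dom_generate_terms (pvDiffWitness_generate_terms.1) (pvDiffWitness_generate_terms.2) ∧ D_generate_terms (pvDiffWitness_generate_terms.1) (pvDiffWitness_generate_terms.2) ∧ generate_terms (pvDiffWitness_generate_terms.1) (pvDiffWitness_generate_terms.2) = pvDiffWitnessOut_generate_terms.1 ∧ generate_terms_alt (pvDiffWitness_generate_terms.1) (pvDiffWitness_generate_terms.2) = pvDiffWitnessOut_generate_terms.2 ∧ pvDiffWitnessOut_generate_terms.1 ≠ pvDiffWitnessOut_generate_terms.2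
def Claim_exact_generate_terms : Prop := ∀ (num_var : Int) (order : Int), Dom_generate_terms num_var order → D_generate_terms num_var order → generate_terms num_var order ≠ generate_terms_alt num_var order

-- ===== LEMMAS AND PROOFS =====

lemma pvIncrement_replicate_none (mx : Int) (k : Nat) (x : Int) (hx : ¬ x < mx) :
    pvIncrement (List.replicate k x) mx = none := by
  induction k with
  | zero => simp [pvIncrement]
  | succ n ih => simp [List.replicate_succ, pvIncrement, ih, hx]

lemma pvRunA_eq (mx : Int) :
    ∀ (L' : List (List Int)) (t : List Int) (f : Nat),
      List.IsChain (fun a b => pvIncrement a mx = some b) (t :: L') →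
      pvIncrement ((t :: L').getLast (List.cons_ne_nil _ _)) mx = none →
      L'.length + 1 ≤ f →
      pvRunA mx f t = t :: L' := by
  intro L'
  induction L' with
  | nil =>
    intro t f _ hlast hf
    match f, hf with
    | f + 1, _ =>
      simp only [List.getLast_singleton] at hlast
      simp [pvRunA, hlast]
  | cons u L'' ih =>
    intro t f hc hlast hf
    match f, hf with
    | f + 1, hf =>
      have h1 : pvIncrement t mx = some u := (List.isChain_cons_cons.mp hc).1
      have h2 := (List.isChain_cons_cons.mp hc).2
      have hlast' : pvIncrement ((u :: L'').getLast (List.cons_ne_nil _ _)) mx = none := by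
        rwa [List.getLast_cons (List.cons_ne_nil _ _)] at hlast
      simp only [pvRunA, h1]
      rw [ih u f h2 hlast' (by simp at hf; omega)]

lemma chain_map_cons (mx v : Int) (l : List (List Int))
    (h : List.IsChain (fun a b => pvIncrement a mx = some b) l) :
    List.IsChain (fun a b => pvIncrement a mx = some b) (l.map (fun t => v :: t)) := by
  rw [List.isChain_map]
  refine h.imp ?_
  intro a b hab
  simp [pvIncrement, hab]

-- head, last and successor-chain structure of B's generator, for num_var ≥ 1
lemma pvExtend_good (num_var : Int) (_h1 : 1 ≤ num_var) :
    ∀ (k : Nat) (start : Int), start ≤ num_var - 1 →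
      (pvExtend num_var k start).head? = some (List.replicate k start) ∧
      (pvExtend num_var k start).getLast? = some (List.replicate k (num_var - 1)) ∧
      List.IsChain (fun a b => pvIncrement a (num_var - 1) = some b) (pvExtend num_var k start) := by
  intro k
  induction k with
  | zero => intro start _; simp [pvExtend]
  | succ k ih =>
    -- inner descending induction on (num_var - 1 - start).toNat
    intro start hs
    have main : ∀ (n : Nat) (start : Int), start ≤ num_var - 1 → (num_var - 1 - start).toNat = n →
        (pvExtend num_var (k+1) start).head? = some (List.replicate (k+1) start) ∧
        (pvExtend num_var (k+1) start).getLast? = some (List.replicate (k+1) (num_var - 1)) ∧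
        List.IsChain (fun a b => pvIncrement a (num_var - 1) = some b) (pvExtend num_var (k+1) start) := by
      intro n
      induction n with
      | zero =>
        intro start hs h0
        have hst : start = num_var - 1 := by omega
        subst hst
        have hr : PySem.List.pyRange (num_var - 1) num_var 1 = [num_var - 1] := by
          have := PySem.List.pyRange_one_singleton (num_var - 1)
          simpa using this
        obtain ⟨ihh, ihl, ihc⟩ := ih (num_var - 1) (le_refl _)
        refine ⟨?_, ?_, ?_⟩
        · simp [pvExtend, hr, List.head?_map, ihh, List.replicate_succ]
        · simp [pvExtend, hr, List.getLast?_map, ihl, List.replicate_succ]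
        · simpa [pvExtend, hr] using chain_map_cons (num_var - 1) (num_var - 1) _ ihc
      | succ n ihn =>
        intro start hs hn
        have hlt : start < num_var - 1 := by omega
        have hcons : PySem.List.pyRange start num_var 1 = start :: PySem.List.pyRange (start + 1) num_var 1 :=
          PySem.List.pyRange_one_cons (by omega)
        have hsplit : pvExtend num_var (k+1) start =
            (pvExtend num_var k start).map (fun t => start :: t) ++ pvExtend num_var (k+1) (start + 1) := by
          conv_lhs => rw [pvExtend, hcons]
          simp [pvExtend]
        obtain ⟨ihh, ihl, ihc⟩ := ih start hs
        obtain ⟨jhh, jhl, jhc⟩ := ihn (start + 1) (by omega) (by omega)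
        have hblock_ne : (pvExtend num_var k start).map (fun t => start :: t) ≠ [] := by
          intro h
          rw [List.map_eq_nil_iff] at h
          simp [h] at ihh
        have link : pvIncrement (start :: List.replicate k (num_var - 1)) (num_var - 1)
            = some (List.replicate (k+1) (start + 1)) := by
          simp [pvIncrement, pvIncrement_replicate_none (num_var - 1) k (num_var - 1) (by omega), hlt,
            List.replicate_succ]
        refine ⟨?_, ?_, ?_⟩
        · rw [hsplit, List.head?_append_of_ne_nil _ hblock_ne]
          simp [List.head?_map, ihh, List.replicate_succ]
        · rw [hsplit, List.getLast?_append_of_ne_nil]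
          · exact jhl
          · intro h; simp [h] at jhh
        · rw [hsplit, List.isChain_append]
          refine ⟨chain_map_cons _ _ _ ihc, jhc, ?_⟩
          intro x hx y hy
          rw [List.getLast?_map, ihl] at hx
          rw [jhh] at hy
          simp at hx hy
          subst hx; subst hy
          exact link
    exact main (num_var - 1 - start).toNat start hs rfl

lemma pvExtend_length_le (num_var : Int) :
    ∀ (k : Nat) (start : Int), 0 ≤ start →
      (pvExtend num_var k start).length ≤ (num_var.toNat + 1) ^ k := by
  intro k
  induction k with
  | zero => intro start _; simp [pvExtend]
  | succ k ih =>
    intro start hs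
    rw [pvExtend, List.length_flatMap]
    have hb : ∀ x ∈ (PySem.List.pyRange start num_var 1).map
        (fun v => ((pvExtend num_var k v).map (fun t => v :: t)).length),
        x ≤ (num_var.toNat + 1) ^ k := by
      intro x hx
      simp only [List.mem_map] at hx
      obtain ⟨v, hv, rfl⟩ := hx
      rw [PySem.List.mem_pyRange_one] at hv
      simpa using ih v (by omega)
    calc ((PySem.List.pyRange start num_var 1).map
            (fun v => ((pvExtend num_var k v).map (fun t => v :: t)).length)).sum
        ≤ ((PySem.List.pyRange start num_var 1).map
            (fun v => ((pvExtend num_var k v).map (fun t => v :: t)).length)).length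
            • ((num_var.toNat + 1) ^ k) := List.sum_le_card_nsmul _ _ hb
      _ ≤ (num_var.toNat + 1) ^ (k + 1) := by
          rw [List.length_map, PySem.List.length_pyRange_one, smul_eq_mul, pow_succ]
          have : (num_var - start).toNat ≤ num_var.toNat + 1 := by omega
          calc (num_var - start).toNat * (num_var.toNat + 1) ^ k
              ≤ (num_var.toNat + 1) * (num_var.toNat + 1) ^ k :=
                Nat.mul_le_mul_right _ this
            _ = (num_var.toNat + 1) ^ k * (num_var.toNat + 1) := by ring

-- per-r: A's while-loop equals B's generator when num_var ≥ 1
lemma pvRunA_eq_pvExtend (num_var : Int) (h1 : 1 ≤ num_var) (n : Nat) :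
    pvRunA (num_var - 1) (pvFuel num_var n) (List.replicate n 0) = pvExtend num_var n 0 := by
  obtain ⟨hh, hl, hc⟩ := pvExtend_good num_var h1 n 0 (by omega)
  obtain ⟨t, L', hE⟩ : ∃ t L', pvExtend num_var n 0 = t :: L' := by
    cases h : pvExtend num_var n 0 with
    | nil => rw [h] at hh; simp at hh
    | cons a l => exact ⟨a, l, rfl⟩
  rw [hE] at hh hl hc
  have ht : t = List.replicate n 0 := by simpa using hh
  have hlen : (t :: L').length ≤ (num_var.toNat + 1) ^ n := by
    rw [← hE]; exact pvExtend_length_le num_var n 0 (le_refl 0)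
  have hlast : pvIncrement ((t :: L').getLast (List.cons_ne_nil _ _)) (num_var - 1) = none := by
    have : (t :: L').getLast (List.cons_ne_nil _ _) = List.replicate n (num_var - 1) := by
      have := List.getLast?_eq_some_getLast (l := t :: L') (List.cons_ne_nil _ _)
      rw [this] at hl
      simpa using hl
    rw [this]
    exact pvIncrement_replicate_none _ _ _ (by omega)
  rw [hE, ← ht]
  exact pvRunA_eq (num_var - 1) L' t (pvFuel num_var n) hc hlast
    (by simp at hlen; unfold pvFuel; omega)

lemma generate_terms_flatMap (num_var order : Int) :
    generate_terms num_var order =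
      (PySem.List.pyRange 0 (order + 1) 1).flatMap
        (fun r => pvRunA (num_var - 1) (pvFuel num_var r.toNat) (List.replicate r.toNat 0)) := by
  unfold generate_terms
  rw [PySem.List.foldl_append_eq_flatMap]
  simp

lemma generate_terms_alt_flatMap (num_var order : Int) :
    generate_terms_alt num_var order =
      (PySem.List.pyRange 0 (order + 1) 1).flatMap (fun r => pvExtend num_var r.toNat 0) := by
  unfold generate_terms_alt
  rw [PySem.List.foldl_append_eq_flatMap]
  simp

-- ===== VERDICT (by name: the statement is the Claim_ definition above) =====
theorem generate_terms_spec : Claim_unchanged_generate_terms := by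
  intro num_var order _ hD
  unfold D_generate_terms at hD
  rw [generate_terms_flatMap, generate_terms_alt_flatMap]
  by_cases h1 : 1 ≤ num_var
  · exact List.flatMap_congr (fun r _ => pvRunA_eq_pvExtend num_var h1 r.toNat)
  · have hord : order ≤ 0 := by omega
    by_cases h0 : order = 0
    · subst h0
      have hr : PySem.List.pyRange 0 (0 + 1 : Int) 1 = [0] := by
        simpa using PySem.List.pyRange_one_singleton (0 : Int)
      rw [hr]
      simp [pvRunA, pvFuel, pvIncrement, pvExtend]
    · have : PySem.List.pyRange 0 (order + 1) 1 = [] :=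
        PySem.List.pyRange_one_eq_nil (by omega)
      rw [this]
      simp

theorem generate_terms_changed : Claim_changed_generate_terms := by
  unfold Claim_changed_generate_terms; decide

theorem generate_terms_tight : Claim_exact_generate_terms := by
  intro num_var order _ hD
  obtain ⟨hnv, hord⟩ := hD
  rw [generate_terms_flatMap, generate_terms_alt_flatMap]
  have hnvt : num_var.toNat = 0 := by omega
  -- each A-block is the singleton [replicate r 0] since increment fails immediately
  have hA : ∀ r : Int, pvRunA (num_var - 1) (pvFuel num_var r.toNat) (List.replicate r.toNat 0)
      = [List.replicate r.toNat 0] := by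
    intro r
    have hfuel : pvFuel num_var r.toNat = 2 := by simp [pvFuel, hnvt]
    rw [hfuel]
    simp [pvRunA, pvIncrement_replicate_none (num_var - 1) r.toNat 0 (by omega)]
  -- each B-block with r ≥ 1 is empty, r = 0 gives [[]]
  have hB : ∀ r ∈ PySem.List.pyRange 0 (order + 1) 1,
      pvExtend num_var r.toNat 0 = if r = 0 then [[]] else [] := by
    intro r hr
    rw [PySem.List.mem_pyRange_one] at hr
    by_cases h0 : r = 0
    · simp [h0, pvExtend]
    · have : ∃ k, r.toNat = k + 1 := ⟨r.toNat - 1, by omega⟩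
      obtain ⟨k, hk⟩ := this
      rw [hk]
      simp [pvExtend, h0, PySem.List.pyRange_one_eq_nil (show num_var ≤ 0 from hnv)]
  intro hcontra
  have hlenA : ((PySem.List.pyRange 0 (order + 1) 1).flatMap
      (fun r => pvRunA (num_var - 1) (pvFuel num_var r.toNat) (List.replicate r.toNat 0))).length
      = (order + 1).toNat := by
    rw [List.flatMap_congr (g := fun r => [List.replicate r.toNat 0]) (fun r _ => hA r)]
    simp [List.length_flatMap, PySem.List.length_pyRange_one]
  have hlenB : ((PySem.List.pyRange 0 (order + 1) 1).flatMap
      (fun r => pvExtend num_var r.toNat 0)).length ≤ 1 := by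
    rw [List.flatMap_congr hB]
    have : PySem.List.pyRange 0 (order + 1) 1 = PySem.List.pyRange 0 1 1 ++ PySem.List.pyRange 1 (order + 1) 1 :=
      PySem.List.pyRange_one_append 0 1 (order + 1) (by omega) (by omega)
    rw [this, List.flatMap_append]
    have h01 : PySem.List.pyRange (0:Int) 1 1 = [0] := by
      simpa using PySem.List.pyRange_one_singleton (0 : Int)
    rw [h01]
    have : ∀ r ∈ PySem.List.pyRange 1 (order + 1) 1, (if r = (0:Int) then [([]:List Int)] else []) = [] := by
      intro r hr
      rw [PySem.List.mem_pyRange_one] at hr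
      simp [show r ≠ 0 by omega]
    rw [List.flatMap_congr (g := fun _ => []) this]
    simp
  rw [hcontra] at hlenA
  omega
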